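-- pv_equiv track=rewrite | github.com/uhauha2929/stutils | stutils/string/arithmetic.py | check_expr
-- ===== SOURCE A (Python) =====
-- def check_expr(expr: str):
--     """检查表达式的合法性，只包含空格数字和英文小括号
--
--     返回值1：括号不匹配 2：异常字符 0：正常
--     """
--     stack = list()
--     for char in expr:
--         if char.isdigit() or char.isspace() or char in '+-*/':
--             continue
--         if char == ')':
--             if not stack or stack[-1] != '(':
--                 return 1
--             stack.pop()
--         elif char == '(':
--             stack.append(char)
--         else:
--             return 2
--     return 0 if not stack else 1
-- ===== SOURCE B (Python) =====
-- def check_expr(expr: str):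
--     """检查表达式的合法性，只包含空格数字和英文小括号
--
--     返回值1：括号不匹配 2：异常字符 0：正常
--     """
--     n = len(expr)
--     # pass 1: position of the first character that is not allowed at all
--     first_bad = n
--     for i, c in enumerate(expr):
--         if not (c.isdigit() or c.isspace() or c in '+-*/()'):
--             first_bad = i
--             break
--     # pass 2: position of the first unmatched ')' (ignoring every non-paren char)
--     first_unmatched = n
--     depth = 0
--     for i, c in enumerate(expr):
--         if c == '(':
--             depth += 1
--         elif c == ')':
--             if depth == 0:
--                 first_unmatched = i
--                 break
--             depth -= 1
--     # the earlier error wins; otherwise validity depends on the final depth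
--     if min(first_bad, first_unmatched) < n:
--         return 1 if first_unmatched <= first_bad else 2
--     return 0 if depth == 0 else 1
-- ===== Notes on version B (the rewrite author's own statement) =====
-- stated objective: alternative
-- what changed: B replaces A's single early-returning stack scan by two independent passes - one locating the first disallowed character, one locating the first unmatched ')' via a paren-only depth count - and decides the result by comparing the two positions (earlier error wins) and the final depth.
import Mathlib
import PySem

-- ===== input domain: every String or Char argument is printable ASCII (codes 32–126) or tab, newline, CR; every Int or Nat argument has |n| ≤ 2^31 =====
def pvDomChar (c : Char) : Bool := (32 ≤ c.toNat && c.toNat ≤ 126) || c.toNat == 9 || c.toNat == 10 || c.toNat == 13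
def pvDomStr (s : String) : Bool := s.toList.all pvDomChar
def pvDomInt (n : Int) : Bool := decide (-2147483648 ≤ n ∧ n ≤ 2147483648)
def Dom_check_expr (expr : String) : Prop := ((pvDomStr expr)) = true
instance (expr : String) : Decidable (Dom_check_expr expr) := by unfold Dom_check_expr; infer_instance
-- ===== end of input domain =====

-- B replaces A's single early-returning stack scan by two independent passes (first
-- disallowed character, first unmatched ')') decided by position comparison; objective: alternative.

-- ===== PORT A =====
-- the for-loop of A over the remaining characters, carrying the stack
def checkExprLoopA : List Char → List Char → Int
  | [], stack => if stack.isEmpty then 0 else 1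
  | c :: rest, stack =>
    if PySem.Chars.isdigit c || PySem.Chars.isspace c
        || (c = '+' || c = '-' || c = '*' || c = '/') then
      checkExprLoopA rest stack
    else if c = ')' then
      if stack.isEmpty || stack.getLast? ≠ some '(' then 1
      else checkExprLoopA rest stack.dropLast
    else if c = '(' then
      checkExprLoopA rest (stack ++ ['('])
    else 2

def check_expr (expr : String) : Int := checkExprLoopA expr.toList []

-- ===== PORT B =====
-- the character test of Source B's first pass
def allowedB (c : Char) : Bool :=
  PySem.Chars.isdigit c || PySem.Chars.isspace c
    || (c = '+' || c = '-' || c = '*' || c = '/' || c = '(' || c = ')')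

-- pass 1 of Source B: index of the first disallowed character (i = current index; length if none)
def firstBad : List Char → Nat → Nat
  | [], i => i
  | c :: rest, i => if !(allowedB c) then i else firstBad rest (i + 1)

-- pass 2 of Source B: index of the first unmatched ')' plus the depth reached (length if none)
def firstUnmatched : List Char → Nat → Int → Nat × Int
  | [], i, depth => (i, depth)
  | c :: rest, i, depth =>
    if c = '(' then firstUnmatched rest (i + 1) (depth + 1)
    else if c = ')' then
      if depth = 0 then (i, depth) else firstUnmatched rest (i + 1) (depth - 1)
    else firstUnmatched rest (i + 1) depth

def check_expr_alt (expr : String) : Int :=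
  let cs := expr.toList
  let fb := firstBad cs 0
  let p := firstUnmatched cs 0 0
  if min fb p.1 < cs.length then (if p.1 ≤ fb then 1 else 2)
  else if p.2 = 0 then 0 else 1

-- ===== PRECONDITION & SPEC =====
def Spec_check_expr (expr : String) (out : Int) : Prop := out = check_expr_alt expr
instance (expr : String) (out : Int) : Decidable (Spec_check_expr expr out) := by unfold Spec_check_expr; infer_instance

-- ===== CLAIM (what is proved, stated in full; the proofs are below) =====
def Claim_equal_check_expr : Prop := ∀ (expr : String), Dom_check_expr expr → Spec_check_expr expr (check_expr expr)

-- ===== LEMMAS AND PROOFS =====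

theorem firstBad_ge (cs : List Char) : ∀ i, i ≤ firstBad cs i := by
  induction cs with
  | nil => intro i; simp [firstBad]
  | cons c rest ih =>
    intro i
    simp only [firstBad]
    split
    · exact le_refl i
    · exact le_trans (Nat.le_succ i) (ih (i + 1))

theorem firstUnmatched_ge (cs : List Char) : ∀ i d, i ≤ (firstUnmatched cs i d).1 := by
  induction cs with
  | nil => intro i d; simp [firstUnmatched]
  | cons c rest ih =>
    intro i d
    simp only [firstUnmatched]
    split
    · exact le_trans (Nat.le_succ i) (ih (i + 1) (d + 1))
    · split
      · split
        · exact le_refl i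
        · exact le_trans (Nat.le_succ i) (ih (i + 1) (d - 1))
      · exact le_trans (Nat.le_succ i) (ih (i + 1) d)

-- the final decision of Source B, factored out so the invariant can be stated at any start index
def decideB (fb : Nat) (p : Nat × Int) (len : Nat) : Int :=
  if min fb p.1 < len then (if p.1 ≤ fb then 1 else 2)
  else if p.2 = 0 then 0 else 1

-- main invariant: A's loop with stack = a run of n '(' equals B's decision computed
-- from the two passes started at any index i with depth n
theorem loopA_eq_decideB (cs : List Char) :
    ∀ (i n : ℕ),
      checkExprLoopA cs (List.replicate n '(') =
        decideB (firstBad cs i) (firstUnmatched cs i (n : Int)) (i + cs.length) := by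
  induction cs with
  | nil =>
    intro i n
    simp only [checkExprLoopA, firstBad, firstUnmatched, decideB, List.length_nil, Nat.add_zero,
      List.isEmpty_replicate, min_self, lt_irrefl, if_false]
    cases n with
    | zero => simp
    | succ m =>
      have h1 : ¬ (((m : ℕ) : Int) + 1 = 0) := by omega
      simp [h1]
  | cons c rest ih =>
    intro i n
    by_cases hok : (PySem.Chars.isdigit c || PySem.Chars.isspace c
        || (c = '+' || c = '-' || c = '*' || c = '/')) = true
    · -- skipped character: not '(' and not ')' (both fail the digit/space/op test)
      have hco : c ≠ '(' := by rintro rfl; revert hok; decide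
      have hcc : c ≠ ')' := by rintro rfl; revert hok; decide
      have hall : allowedB c = true := by
        simp only [allowedB]
        simp only [Bool.or_eq_true] at hok ⊢
        tauto
      simp only [checkExprLoopA, hok, if_true, firstBad, hall, Bool.not_true,
        Bool.false_eq_true, if_false, firstUnmatched, hco, hcc, if_neg, List.length_cons]
      rw [show i + (rest.length + 1) = (i + 1) + rest.length by omega]
      exact ih (i + 1) n
    · simp only [checkExprLoopA, hok, Bool.false_eq_true, if_false]
      by_cases hcc : c = ')'
      · subst hcc
        have hall : allowedB ')' = true := by decide
        simp only [firstBad, hall, Bool.not_true, Bool.false_eq_true, if_false,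
          firstUnmatched, List.length_cons]
        have hnotop : (')' : Char) ≠ '(' := by decide
        simp only [hnotop, if_false, if_pos rfl]
        cases n with
        | zero =>
          -- unmatched ')': both sides give 1
          have hfb : i + 1 ≤ firstBad rest (i + 1) := firstBad_ge rest (i + 1)
          simp only [List.replicate_zero, List.isEmpty_nil, Bool.true_or, if_true,
            Nat.cast_zero, if_pos rfl, decideB]
          have hmin : min (firstBad rest (i + 1)) i < i + (rest.length + 1) := by omega
          rw [if_pos hmin, if_pos (by omega : i ≤ firstBad rest (i + 1))]
        | succ m =>
          have hlast : (List.replicate (m + 1) '(').getLast? = some '(' := by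
            simp [List.getLast?_replicate]
          have hdrop : (List.replicate (m + 1) '(').dropLast = List.replicate m '(' := by
            simp [List.dropLast_replicate]
          have hne : ((m + 1 : ℕ) : Int) ≠ 0 := by omega
          simp only [List.isEmpty_replicate, Nat.add_eq_zero, Nat.succ_ne_zero, and_false,
            decide_false, Bool.false_or, hlast, ne_eq, not_true_eq_false, decide_false,
            Bool.false_eq_true, if_false, hdrop, hne, if_neg]
          rw [show ((m + 1 : ℕ) : Int) - 1 = ((m : ℕ) : Int) by push_cast; ring,
            show i + (rest.length + 1) = (i + 1) + rest.length by omega]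
          exact ih (i + 1) m
      · by_cases hco : c = '('
        · subst hco
          have hall : allowedB '(' = true := by decide
          simp only [hcc, Bool.false_eq_true, if_false, if_pos rfl, firstBad, hall,
            Bool.not_true, firstUnmatched, if_pos rfl, List.length_cons]
          rw [show List.replicate n '(' ++ ['('] = List.replicate (n + 1) '(' by
                simp [List.replicate_succ'],
            show ((n : ℕ) : Int) + 1 = ((n + 1 : ℕ) : Int) by push_cast; ring,
            show i + (rest.length + 1) = (i + 1) + rest.length by omega]
          exact ih (i + 1) (n + 1)
        · -- invalid character: A returns 2; B's first_bad = i, earlier than first_unmatched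
          have hall : allowedB c = false := by
            apply Bool.eq_false_iff.mpr
            simp only [allowedB, ne_eq, Bool.or_eq_true, decide_eq_true_eq]
            simp only [Bool.or_eq_true, decide_eq_true_eq] at hok
            tauto
          simp only [hcc, hco, Bool.false_eq_true, if_false, firstBad, hall, Bool.not_false,
            if_true, firstUnmatched, if_neg hco, if_neg hcc, List.length_cons, decideB]
          have hfu : i + 1 ≤ (firstUnmatched rest (i + 1) (n : Int)).1 :=
            firstUnmatched_ge rest (i + 1) _
          rw [if_pos (by omega : min i (firstUnmatched rest (i + 1) (n : Int)).1
                < i + (rest.length + 1)),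
            if_neg (by omega : ¬ (firstUnmatched rest (i + 1) (n : Int)).1 ≤ i)]

-- ===== VERDICT (by name: the statement is the Claim_ definition above) =====
theorem check_expr_spec : Claim_equal_check_expr := by
  intro expr _
  unfold Spec_check_expr check_expr check_expr_alt
  have h := loopA_eq_decideB expr.toList 0 0
  simpa [decideB] using h
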